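-- pv_equiv track=rewrite | github.com/DavideCorradiDev/advent_of_code_2025 | day9/main.py | main2_alt
-- ===== SOURCE A (Python) =====
-- from itertools import combinations
--
-- def area(p0, p1):
--     w = abs(p1[0] - p0[0]) + 1
--     h = abs(p1[1] - p0[1]) + 1
--     return w * h
--
-- def segment_is_outside_rectangle(a, b, left, right, top, bottom):
--     if a[0] == b[0]: # Vertical
--         return a[0] <= left or a[0] >= right or max(a[1], b[1]) <= top or min(a[1], b[1]) >= bottom
--     else:
--         assert(a[1] == b[1]) # horizontal
--         return a[1] <= top or a[1] >= bottom or max(a[0], b[0]) <= left or min(a[0], b[0]) >= right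
--
-- def polygon_surrounds_rectangle(poly, left, right, top, bottom):
--     for i in range(len(poly)):
--         j = (i + 1) % len(poly)
--         if not segment_is_outside_rectangle(poly[i], poly[j], left, right, top, bottom):
--             return False
--     return True
--
-- def main2_alt(points):
--     areas = [(area(a, b), a, b) for a, b in combinations(points, 2)]
--     for val, a, b in reversed(sorted(areas)):
--         left = min(a[0], b[0])
--         right = max(a[0], b[0])
--         top = min(a[1], b[1])
--         bottom = max(a[1], b[1])
--         if polygon_surrounds_rectangle(points, left, right, top, bottom):
--             return val
--     return 0
-- ===== SOURCE B (Python) =====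
-- def main2_alt(points):
--     edges = list(zip(points, points[1:] + points[:1]))
--
--     def surrounds(l, r, t, bo):
--         return all(not (min(px, qx) < r and max(px, qx) > l
--                         and min(py, qy) < bo and max(py, qy) > t)
--                    for (px, py), (qx, qy) in edges)
--
--     best = 0
--     rest = list(points)
--     while rest:
--         ax, ay = rest.pop(0)
--         for bx, by in rest:
--             l, r = min(ax, bx), max(ax, bx)
--             t, bo = min(ay, by), max(ay, by)
--             if surrounds(l, r, t, bo):
--                 best = max(best, (r - l + 1) * (bo - t + 1))
--     return best
-- ===== Notes on version B (the rewrite author's own statement) =====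
-- stated objective: simpler
-- what changed: B drops A's materialized (area,a,b) triple list, full lexicographic sort, reversal and first-match early return, and instead peels the point list head by head keeping a running maximum area over the surrounded pairs; the per-edge test is a single unified box-overlap negation over precomputed cyclic edges (zip of the list with its rotation) instead of A's vertical/horizontal branch over indices mod n.
import Mathlib
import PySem

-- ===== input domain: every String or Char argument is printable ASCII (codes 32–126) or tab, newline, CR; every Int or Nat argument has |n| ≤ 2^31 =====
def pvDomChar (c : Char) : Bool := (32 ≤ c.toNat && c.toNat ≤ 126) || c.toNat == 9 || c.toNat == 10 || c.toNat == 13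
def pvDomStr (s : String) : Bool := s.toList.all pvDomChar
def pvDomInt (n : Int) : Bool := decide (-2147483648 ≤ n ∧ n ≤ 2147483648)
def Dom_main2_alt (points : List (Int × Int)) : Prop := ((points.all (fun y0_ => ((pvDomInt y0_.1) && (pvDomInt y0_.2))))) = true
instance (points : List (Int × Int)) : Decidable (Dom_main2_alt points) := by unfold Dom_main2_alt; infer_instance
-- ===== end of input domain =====

-- B replaces A's build-all-areas list + full sort + reversed-first-match by peeling the point list
-- head by head with a running maximum over surrounded pairs, testing edges (precomputed as the zip of
-- the list with its rotation) by one unified box-overlap negation (objective: simpler).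

-- ===== PORT A =====
def areaFn (p0 p1 : Int × Int) : Int :=
  ((p1.1 - p0.1).natAbs + 1 : Int) * ((p1.2 - p0.2).natAbs + 1 : Int)

-- the 'assert a[1] == b[1]' branch is ported without the assert; Pre_main2_alt (rectilinear polygon)
-- guarantees the assert would pass in Python
def segOutside (a b : Int × Int) (l r t bo : Int) : Bool :=
  if a.1 == b.1 then
    decide (a.1 ≤ l) || decide (a.1 ≥ r) || decide (max a.2 b.2 ≤ t) || decide (min a.2 b.2 ≥ bo)
  else
    decide (a.2 ≤ t) || decide (a.2 ≥ bo) || decide (max a.1 b.1 ≤ l) || decide (min a.1 b.1 ≥ r)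

def polySurrounds (poly : List (Int × Int)) (l r t bo : Int) : Bool :=
  (List.range poly.length).all (fun i =>
    segOutside (poly.getD i (0, 0)) (poly.getD ((i + 1) % poly.length) (0, 0)) l r t bo)

-- the 'for val, a, b in reversed(sorted(areas)): … return val / return 0' loop of A
def loopA (points : List (Int × Int)) : List (Int × (Int × Int) × (Int × Int)) → Int
  | [] => 0
  | (val, a, b) :: rest =>
    let l := min a.1 b.1
    let r := max a.1 b.1
    let t := min a.2 b.2
    let bo := max a.2 b.2
    if polySurrounds points l r t bo then val else loopA points rest

-- Python sorts the triples (val, a, b) lexicographically: ported with a lexicographic key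
def tripleKey (t : Int × (Int × Int) × (Int × Int)) : Lex (Int × Lex (Int × Lex (Int × Lex (Int × Int)))) :=
  toLex (t.1, toLex (t.2.1.1, toLex (t.2.1.2, toLex (t.2.2.1, t.2.2.2))))

def main2_alt (points : List (Int × Int)) : Int :=
  let areas := (PySem.List.combinations points 2).map (fun c =>
    match c with
    | [a, b] => (areaFn a b, a, b)
    | _ => (0, (0, 0), (0, 0)))
  loopA points (PySem.List.sorted areas tripleKey false).reverse

-- ===== PORT B =====
-- edges = list(zip(points, points[1:] + points[:1]))
def edgesB (points : List (Int × Int)) : List ((Int × Int) × (Int × Int)) :=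
  points.zip (PySem.List.slice points (some 1) none ++ PySem.List.slice points none (some 1))

-- the 'surrounds' closure: all(not (overlap with the open rectangle)) over the edges
def surroundsB (edges : List ((Int × Int) × (Int × Int))) (l r t bo : Int) : Bool :=
  edges.all (fun e =>
    !(decide (min e.1.1 e.2.1 < r) && decide (max e.1.1 e.2.1 > l) &&
      decide (min e.1.2 e.2.2 < bo) && decide (max e.1.2 e.2.2 > t)))

-- 'for bx, by in rest: …' (inner loop, running best)
def innerB (edges : List ((Int × Int) × (Int × Int))) (a : Int × Int) (best : Int)
    (rest : List (Int × Int)) : Int :=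
  rest.foldl (fun best b =>
    let l := min a.1 b.1
    let r := max a.1 b.1
    let t := min a.2 b.2
    let bo := max a.2 b.2
    if surroundsB edges l r t bo then max best ((r - l + 1) * (bo - t + 1)) else best) best

-- 'while rest: a = rest.pop(0); …' (outer loop)
def outerB (edges : List ((Int × Int) × (Int × Int))) : Int → List (Int × Int) → Int
  | best, [] => best
  | best, a :: rest => outerB edges (innerB edges a best rest) rest

def main2_alt_alt (points : List (Int × Int)) : Int :=
  outerB (edgesB points) 0 points

-- ===== PRECONDITION & SPEC =====
-- Pre_ requires the polygon to be rectilinear (each cyclically adjacent pair of points shares an x or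
-- a y coordinate): on any polygon with a diagonal edge A hits 'assert(a[1] == b[1])' whenever the
-- surrounds-scan reaches that edge and raises AssertionError (no non-rectilinear input on which A
-- returns was found).
def Pre_main2_alt (points : List (Int × Int)) : Prop :=
  ∀ i, i < points.length →
    (points.getD i (0, 0)).1 = (points.getD ((i + 1) % points.length) (0, 0)).1 ∨
    (points.getD i (0, 0)).2 = (points.getD ((i + 1) % points.length) (0, 0)).2
instance (points : List (Int × Int)) : Decidable (Pre_main2_alt points) := by
  unfold Pre_main2_alt; infer_instance

def pvWitness_main2_alt : (List (Int × Int)) := [(0, 0), (0, 2), (3, 2), (3, 0)]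

def Spec_main2_alt (points : List (Int × Int)) (out : Int) : Prop := out = main2_alt_alt points
instance (points : List (Int × Int)) (out : Int) : Decidable (Spec_main2_alt points out) := by unfold Spec_main2_alt; infer_instance

-- ===== CLAIM (what is proved, stated in full; the proofs are below) =====
def Claim_equal_main2_alt : Prop := ∀ (points : List (Int × Int)), Dom_main2_alt points → Pre_main2_alt points → Spec_main2_alt points (main2_alt points)

-- ===== LEMMAS AND PROOFS =====

-- the triple list A builds, and the step function of a max-fold over it
def triples (points : List (Int × Int)) : List (Int × (Int × Int) × (Int × Int)) :=
  (PySem.List.combinations points 2).map (fun c =>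
    match c with
    | [a, b] => (areaFn a b, a, b)
    | _ => (0, (0, 0), (0, 0)))

def stepG (points : List (Int × Int)) (best : Int) (t : Int × (Int × Int) × (Int × Int)) : Int :=
  if polySurrounds points (min t.2.1.1 t.2.2.1) (max t.2.1.1 t.2.2.1)
      (min t.2.1.2 t.2.2.2) (max t.2.1.2 t.2.2.2) then max best t.1 else best

-- B's inner step, as a named function of the pair
def stepB (edges : List ((Int × Int) × (Int × Int))) (best : Int) (a b : Int × Int) : Int :=
  if surroundsB edges (min a.1 b.1) (max a.1 b.1) (min a.2 b.2) (max a.2 b.2) then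
    max best ((max a.1 b.1 - min a.1 b.1 + 1) * (max a.2 b.2 - min a.2 b.2 + 1))
  else best

theorem one_le_areaFn (a b : Int × Int) : 1 ≤ areaFn a b := by
  unfold areaFn
  have h1 : (0 : Int) ≤ ((b.1 - a.1).natAbs : Int) := Int.natCast_nonneg _
  have h2 : (0 : Int) ≤ ((b.2 - a.2).natAbs : Int) := Int.natCast_nonneg _
  nlinarith

theorem mem_triples_pos (points : List (Int × Int)) (t : Int × (Int × Int) × (Int × Int))
    (ht : t ∈ triples points) : 1 ≤ t.1 := by
  unfold triples at ht
  rcases List.mem_map.mp ht with ⟨c, hc, rfl⟩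
  have hlen : c.length = 2 := ((PySem.List.mem_combinations_iff points 2 c).mp hc).2
  match c, hlen with
  | [a, b], _ => exact one_le_areaFn a b

theorem stepG_rcomm (points : List (Int × Int)) (z : Int) (x y : Int × (Int × Int) × (Int × Int)) :
    stepG points (stepG points z x) y = stepG points (stepG points z y) x := by
  unfold stepG
  split_ifs <;> simp [max_right_comm]

-- if everything in rest is already ≤ acc, a max-fold leaves acc unchanged
theorem foldl_stepG_const (points : List (Int × Int)) (rest : List (Int × (Int × Int) × (Int × Int)))
    (acc : Int) (h : ∀ y ∈ rest, y.1 ≤ acc) : rest.foldl (stepG points) acc = acc := by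
  induction rest with
  | nil => rfl
  | cons y t ih =>
    have hy : y.1 ≤ acc := h y (List.mem_cons_self ..)
    have hstep : stepG points acc y = acc := by
      unfold stepG; split_ifs <;> omega
    rw [List.foldl_cons, hstep]
    exact ih (fun z hz => h z (List.mem_cons_of_mem _ hz))

-- on a list descending in .1 with positive .1, A's first-match loop equals the max-fold from 0
theorem loopA_eq_foldl (points : List (Int × Int)) (L : List (Int × (Int × Int) × (Int × Int)))
    (hdesc : L.Pairwise (fun x y => y.1 ≤ x.1)) (hpos : ∀ t ∈ L, 1 ≤ t.1) :
    loopA points L = L.foldl (stepG points) 0 := by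
  induction L with
  | nil => rfl
  | cons t rest ih =>
    rcases List.pairwise_cons.mp hdesc with ⟨hhead, htail⟩
    have hpt : 1 ≤ t.1 := hpos t (List.mem_cons_self ..)
    obtain ⟨val, a, b⟩ := t
    by_cases hp : polySurrounds points (min a.1 b.1) (max a.1 b.1) (min a.2 b.2) (max a.2 b.2) = true
    · simp only [loopA, stepG, List.foldl_cons, hp, if_pos]
      have : max (0 : Int) val = val := by simp at hpt ⊢; omega
      rw [this]
      exact (foldl_stepG_const points rest val (fun y hy => hhead y hy)).symm
    · simp only [loopA, stepG, List.foldl_cons, hp]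
      rw [if_neg (by simp), if_neg (by simp)]
      exact ih htail (fun z hz => hpos z (List.mem_cons_of_mem _ hz))

theorem key_le_fst {x y : Int × (Int × Int) × (Int × Int)} (h : tripleKey x ≤ tripleKey y) :
    x.1 ≤ y.1 := by
  unfold tripleKey at h
  rcases Prod.Lex.le_iff.mp h with h1 | ⟨h1, _⟩
  · exact le_of_lt h1
  · exact le_of_eq h1

theorem main2_alt_as_loop (points : List (Int × Int)) :
    main2_alt points = loopA points (PySem.List.sorted (triples points) tripleKey false).reverse := rfl

-- A as a max-fold of stepG over the triples
theorem A_as_fold (points : List (Int × Int)) :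
    main2_alt points = (triples points).foldl (stepG points) 0 := by
  rw [main2_alt_as_loop]
  set L := (PySem.List.sorted (triples points) tripleKey false).reverse with hL
  have hperm : L.Perm (triples points) :=
    (List.reverse_perm _).trans (PySem.List.sorted_perm _ _ _)
  have hdesc : L.Pairwise (fun x y => y.1 ≤ x.1) := by
    rw [hL, List.pairwise_reverse]
    exact (PySem.List.sorted_pairwise (triples points) tripleKey).imp (fun h => key_le_fst h)
  have hpos : ∀ t ∈ L, 1 ≤ t.1 := fun t ht => mem_triples_pos points t (hperm.mem_iff.mp ht)
  rw [loopA_eq_foldl points L hdesc hpos]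
  exact hperm.foldl_eq' (fun x _ y _ z => stepG_rcomm points z x y) 0

-- ---- B-side lemmas ----

-- B's outer/inner loops compute the stepB-fold over combinations(points, 2)
theorem outerB_eq_fold (edges : List ((Int × Int) × (Int × Int))) (pts : List (Int × Int))
    (best : Int) :
    outerB edges best pts =
      (PySem.List.combinations pts 2).foldl
        (fun bst c => stepB edges bst (c.getD 0 (0, 0)) (c.getD 1 (0, 0))) best := by
  induction pts generalizing best with
  | nil => rfl
  | cons x xs ih =>
    rw [outerB, ih, PySem.List.combinations_cons_succ, PySem.List.combinations_one,
      List.foldl_append, List.map_map, List.foldl_map]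
    rfl

-- the edge list is the cyclic (points[i], points[(i+1) % n]) pairing
theorem edgesB_eq (points : List (Int × Int)) :
    edgesB points = (List.range points.length).map (fun i =>
      (points.getD i (0, 0), points.getD ((i + 1) % points.length) (0, 0))) := by
  unfold edgesB
  rw [PySem.List.slice_from_one, show PySem.List.slice points none (some 1) = points.take 1 from
    PySem.List.slice_to_natCast points 1]
  apply List.ext_getElem
  · rcases points with _ | ⟨p, ps⟩ <;> simp
  · intro i h1 h2
    have hn : i < points.length := by simpa using h2
    simp only [List.getElem_zip, List.getElem_map, List.getElem_range]
    refine Prod.ext ?_ ?_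
    · exact (List.getD_eq_getElem _ _ hn).symm
    · by_cases hlt : i + 1 < points.length
      · have htl : i < points.tail.length := by simp; omega
        rw [List.getElem_append_left htl, List.getElem_tail,
          Nat.mod_eq_of_lt hlt, List.getD_eq_getElem _ _ hlt]
      · have hi : i = points.length - 1 := by omega
        have hpos : 0 < points.length := by omega
        have htl : points.tail.length ≤ i := by simp; omega
        rw [List.getElem_append_right htl]
        have : (i + 1) % points.length = 0 := by
          rw [show i + 1 = points.length by omega, Nat.mod_self]
        rw [this, List.getD_eq_getElem _ _ hpos]
        simp [List.getElem_take, hi]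

-- Bool-valued 'all' congruence on the members (specific shape used below)
theorem all_congr_mem {α : Type} (l : List α) (f g : α → Bool) (h : ∀ x ∈ l, f x = g x) :
    l.all f = l.all g := by
  induction l with
  | nil => rfl
  | cons x xs ih =>
    simp only [List.all_cons, h x (List.mem_cons_self ..),
      ih (fun y hy => h y (List.mem_cons_of_mem _ hy))]

-- on an axis-aligned segment, the negated-overlap test equals A's branch test
theorem seg_eq (a b : Int × Int) (l r t bo : Int) (h : a.1 = b.1 ∨ a.2 = b.2) :
    (!(decide (min a.1 b.1 < r) && decide (max a.1 b.1 > l) &&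
       decide (min a.2 b.2 < bo) && decide (max a.2 b.2 > t))) = segOutside a b l r t bo := by
  unfold segOutside
  by_cases hc : a.1 = b.1
  · rw [if_pos (by simpa using hc)]
    apply Bool.eq_iff_iff.mpr
    simp only [Bool.not_eq_true', Bool.and_eq_false_iff, decide_eq_false_iff_not, not_lt,
      Bool.or_eq_true, decide_eq_true_eq, ge_iff_le]
    omega
  · rw [if_neg (by simpa using hc)]
    have h2 : a.2 = b.2 := h.resolve_left hc
    apply Bool.eq_iff_iff.mpr
    simp only [Bool.not_eq_true', Bool.and_eq_false_iff, decide_eq_false_iff_not, not_lt,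
      Bool.or_eq_true, decide_eq_true_eq, ge_iff_le]
    omega

-- under Pre_ (rectilinear polygon), B's surrounds test equals A's
theorem surroundsB_eq (points : List (Int × Int)) (hpre : Pre_main2_alt points)
    (l r t bo : Int) : surroundsB (edgesB points) l r t bo = polySurrounds points l r t bo := by
  unfold surroundsB polySurrounds
  rw [edgesB_eq, List.all_map]
  apply all_congr_mem
  intro i hi
  have hn : i < points.length := List.mem_range.mp hi
  exact seg_eq _ _ l r t bo (hpre i hn)

-- the two area formulas agree
theorem area_eq (a b : Int × Int) :
    (max a.1 b.1 - min a.1 b.1 + 1) * (max a.2 b.2 - min a.2 b.2 + 1) = areaFn a b := by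
  unfold areaFn
  have h1 : max a.1 b.1 - min a.1 b.1 + 1 = ((b.1 - a.1).natAbs + 1 : Int) := by omega
  have h2 : max a.2 b.2 - min a.2 b.2 + 1 = ((b.2 - a.2).natAbs + 1 : Int) := by omega
  rw [h1, h2]

-- B as the stepG-fold over the triples, under Pre_
theorem B_as_fold (points : List (Int × Int)) (hpre : Pre_main2_alt points) :
    main2_alt_alt points = (triples points).foldl (stepG points) 0 := by
  unfold main2_alt_alt triples
  rw [outerB_eq_fold, List.foldl_map]
  apply PySem.List.foldl_congr_mem
  intro acc c hc
  have hlen : c.length = 2 := ((PySem.List.mem_combinations_iff points 2 c).mp hc).2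
  match c, hlen with
  | [a, b], _ =>
    show stepB (edgesB points) acc a b = stepG points acc (areaFn a b, a, b)
    unfold stepB stepG
    rw [surroundsB_eq points hpre, area_eq]

-- ===== VERDICT (by name: the statement is the Claim_ definition above) =====
theorem main2_alt_spec : Claim_equal_main2_alt := by
  intro points _ hpre
  unfold Spec_main2_alt
  rw [A_as_fold, B_as_fold points hpre]
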